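-- pv_equiv track=rewrite | github.com/para0107/Autonomous-AI-API-Testing | input_processing/endpoint_extractor.py | group_endpoints
-- ===== SOURCE A (Python) =====
-- from typing import Dict, List, Any
--
-- def group_endpoints(endpoints: List[Dict[str, Any]]) -> Dict[str, List[Dict[str, Any]]]:
--     """Group endpoints by resource"""
--     grouped = {}
--
--     for endpoint in endpoints:
--         # Group by resource name (first path segment after base)
--         path = endpoint.get('path', '')
--         if path:
--             # Extract resource from path
--             parts = path.strip('/').split('/')
--             if parts:
--                 # Skip version numbers
--                 resource = parts[0]
--                 if resource.startswith('v') and resource[1:].isdigit():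
--                     resource = parts[1] if len(parts) > 1 else 'root'
--
--                 if resource not in grouped:
--                     grouped[resource] = []
--                 grouped[resource].append(endpoint)
--
--     return grouped
-- ===== SOURCE B (Python) =====
-- def _resource(path):
--     parts = path.strip('/').split('/')
--     first = parts[0]
--     if first.startswith('v') and first[1:].isdigit():
--         return parts[1] if len(parts) > 1 else 'root'
--     return first
--
--
-- def group_endpoints(endpoints):
--     """Group endpoints by resource: map each kept endpoint to its key once,
--     then gather the groups key by key (first-occurrence key order)."""
--     keyed = [(_resource(e.get('path', '')), e)
--              for e in endpoints if e.get('path', '')]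
--     keys = list(dict.fromkeys(k for k, _ in keyed))
--     return {k: [e for r, e in keyed if r == k] for k in keys}
-- ===== Notes on version B (the rewrite author's own statement) =====
-- stated objective: alternative
-- what changed: A builds the grouped dict incrementally in one fold with a membership test and per-endpoint append; B instead maps each kept endpoint to its resource key once, dedups the keys in first-occurrence order (dict.fromkeys), and gathers each group by filtering the keyed list per key.
import Mathlib
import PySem

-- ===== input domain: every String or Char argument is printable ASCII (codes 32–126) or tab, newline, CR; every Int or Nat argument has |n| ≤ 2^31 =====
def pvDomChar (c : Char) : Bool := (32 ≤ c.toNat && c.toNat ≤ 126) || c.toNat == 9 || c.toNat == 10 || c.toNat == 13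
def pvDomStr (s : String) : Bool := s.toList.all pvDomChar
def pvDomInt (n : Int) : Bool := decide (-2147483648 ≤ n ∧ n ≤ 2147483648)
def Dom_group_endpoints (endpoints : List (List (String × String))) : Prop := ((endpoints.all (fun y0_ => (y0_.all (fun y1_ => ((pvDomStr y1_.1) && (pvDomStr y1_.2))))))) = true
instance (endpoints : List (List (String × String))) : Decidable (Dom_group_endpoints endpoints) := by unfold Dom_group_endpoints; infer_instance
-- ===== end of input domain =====

-- B replaces A's incremental dict-building fold by a map-once / dedup-keys / gather-per-key
-- decomposition (objective: alternative; same return value, including key and group order).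

-- ===== PORT A =====
-- A builds the grouped dict in one pass: for each endpoint with a non-empty path it extracts
-- the resource key and appends the endpoint to grouped[resource].
def group_endpoints (endpoints : List (List (String × String))) : List (String × List (List (String × String))) :=
  let grouped := endpoints.foldl
    (fun (grouped : PySem.Dict String (List (List (String × String)))) endpoint =>
      -- endpoint.get('path', ''): first-match lookup in the association list
      let path := ((endpoint.find? (fun p => p.1 == "path")).map (·.2)).getD ""
      if path ≠ "" then
        let parts := (PySem.Str.split? (PySem.Str.stripChars path "/") "/").getD []
        if parts ≠ [] then
          let resource := parts.headI   -- parts[0]; exact: guarded by `if parts`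
          let resource := if PySem.Str.startswith resource "v" && PySem.Str.strIsdigit (PySem.Str.slice resource (some 1) none)
            then (if parts.length > 1 then (PySem.List.pyGet? parts 1).getD "" else "root")  -- parts[1]; exact: len(parts) > 1
            else resource
          let grouped := if grouped.contains resource then grouped else grouped.insert resource []
          -- grouped[resource].append(endpoint); the key is present, so modify is exact
          grouped.modify resource [] (fun x => x ++ [endpoint])
        else grouped
      else grouped)
    PySem.Dict.empty
  grouped.items

-- ===== PORT B =====
def pvResource (path : String) : String :=
  let parts := (PySem.Str.split? (PySem.Str.stripChars path "/") "/").getD []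
  let first := parts.headI   -- parts[0]; exact: str.split('/') never returns an empty list (parts_ne_nil below)
  if PySem.Str.startswith first "v" && PySem.Str.strIsdigit (PySem.Str.slice first (some 1) none) then
    if parts.length > 1 then (PySem.List.pyGet? parts 1).getD "" else "root"  -- parts[1]; exact: len(parts) > 1
  else first

-- endpoint.get('path', ''): first-match lookup in the association list
def pvGetPath (endpoint : List (String × String)) : String :=
  ((endpoint.find? (fun p => p.1 == "path")).map (·.2)).getD ""

def group_endpoints_alt (endpoints : List (List (String × String))) : List (String × List (List (String × String))) :=
  let keyed := (endpoints.filter (fun e => pvGetPath e ≠ "")).map (fun e => (pvResource (pvGetPath e), e))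
  let keys := PySem.List.dedup (keyed.map (·.1))   -- dict.fromkeys: first occurrences, in order
  keys.map (fun k => (k, (keyed.filter (fun p => p.1 == k)).map (·.2)))

-- ===== PRECONDITION & SPEC =====
def Spec_group_endpoints (endpoints : List (List (String × String))) (out : List (String × List (List (String × String)))) : Prop := out = group_endpoints_alt endpoints
instance (endpoints : List (List (String × String))) (out : List (String × List (List (String × String)))) : Decidable (Spec_group_endpoints endpoints out) := by unfold Spec_group_endpoints; infer_instance

-- ===== CLAIM (what is proved, stated in full; the proofs are below) =====
def Claim_equal_group_endpoints : Prop := ∀ (endpoints : List (List (String × String))), Dom_group_endpoints endpoints → Spec_group_endpoints endpoints (group_endpoints endpoints)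

-- ===== LEMMAS AND PROOFS =====

-- str.split(sep) never yields the empty list
lemma splitOn_go_ne_nil (sep : List Char) : ∀ (fuel : Nat) (l cur : List Char) (acc : List (List Char)), PySem.Chars.splitOn.go sep fuel l cur acc ≠ [] := by
  intro fuel
  induction fuel with
  | zero => intro l cur acc; simp [PySem.Chars.splitOn.go]
  | succ n ih =>
    intro l cur acc
    cases l with
    | nil => simp [PySem.Chars.splitOn.go]
    | cons c rest =>
      simp only [PySem.Chars.splitOn.go]
      split_ifs with h
      · exact ih _ _ _
      · exact ih _ _ _

lemma parts_ne_nil (s : String) : (PySem.Str.split? s "/").getD [] ≠ [] := by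
  have h := splitOn_go_ne_nil ("/".toList) (s.toList.length + 1) s.toList [] []
  simp only [PySem.Str.split?, PySem.Chars.split?, PySem.Chars.splitOn]
  simp only [show (("/".toList).isEmpty) = false from rfl, Bool.false_eq_true, if_false,
    Option.map_some, Option.getD_some, ne_eq, List.map_eq_nil_iff]
  exact h

lemma contains_false_find_none {κ ν : Type} [BEq κ] (g : PySem.Dict κ ν) (k : κ)
    (h : g.contains k = false) : List.find? (fun p => p.1 == k) g.items = none := by
  rw [List.find?_eq_none]
  intro p hp
  simp only [PySem.Dict.contains] at h
  intro hb
  have h2 : (g.items.any fun q => q.1 == k) = true := List.any_eq_true.mpr ⟨p, hp, hb⟩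
  rw [h] at h2; exact Bool.false_ne_true h2

lemma insert_insert_self {κ ν : Type} [BEq κ] [LawfulBEq κ] (g : PySem.Dict κ ν) (k : κ) (v w : ν) :
    (g.insert k v).insert k w = g.insert k w := by
  by_cases h : g.contains k = true
  · simp only [PySem.Dict.insert, h, if_true]
    have hc : ((PySem.Dict.mk (List.map (fun p => if (p.1 == k) = true then (k, v) else p) g.items)).contains k) = true := by
      simp only [PySem.Dict.contains, List.any_map, List.any_eq_true] at h ⊢
      obtain ⟨p, hp, hpk⟩ := h
      exact ⟨p, hp, by simp [hpk]⟩
    simp only [hc, if_true]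
    congr 1
    simp only [List.map_map]
    apply List.map_congr_left
    intro p _
    by_cases hpk : (p.1 == k) = true <;> simp [hpk]
  · have h' : g.contains k = false := by simpa using h
    have hf := contains_false_find_none g k h'
    simp only [PySem.Dict.insert, h', Bool.false_eq_true, if_false]
    have hc : ((PySem.Dict.mk (g.items ++ [(k, v)])).contains k) = true := by
      simp [PySem.Dict.contains]
    simp only [hc, if_true]
    congr 1
    simp only [List.map_append]
    have hg : List.map (fun p => if (p.1 == k) = true then (k, w) else p) g.items = List.map id g.items := by
      apply List.map_congr_left
      intro p hp
      have : (p.1 == k) = false := by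
        by_contra hb
        rw [List.find?_eq_none] at hf
        exact hf p hp (by simpa using hb)
      simp [this]
    rw [hg, List.map_id]
    simp

-- A's "ensure the key, then append" collapses to a single modify
lemma setdefault_modify_collapse {κ : Type} [BEq κ] [LawfulBEq κ] {ν : Type} (g : PySem.Dict κ (List ν)) (k : κ) (f : List ν → List ν) :
    (if g.contains k then g else g.insert k []).modify k [] f = g.modify k [] f := by
  by_cases h : g.contains k = true
  · simp [h]
  · have h' : g.contains k = false := by simpa using h
    simp only [h', Bool.false_eq_true, if_false, PySem.Dict.modify]
    have hget : (g.insert k []).getD k [] = g.getD k [] := by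
      simp only [PySem.Dict.insert, h', Bool.false_eq_true, if_false, PySem.Dict.getD, PySem.Dict.get?]
      rw [List.find?_append, contains_false_find_none g k h']
      simp
    rw [hget, insert_insert_self]

-- the endpoint-level step of A, rephrased as one modify over the (key, endpoint) pair
lemma stepA_eq (g : PySem.Dict String (List (List (String × String)))) (endpoint : List (String × String)) :
    (let path := ((endpoint.find? (fun p => p.1 == "path")).map (·.2)).getD ""
     if path ≠ "" then
       let parts := (PySem.Str.split? (PySem.Str.stripChars path "/") "/").getD []
       if parts ≠ [] then
         let resource := parts.headI
         let resource := if PySem.Str.startswith resource "v" && PySem.Str.strIsdigit (PySem.Str.slice resource (some 1) none)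
           then (if parts.length > 1 then (PySem.List.pyGet? parts 1).getD "" else "root")
           else resource
         let grouped := if g.contains resource then g else g.insert resource []
         grouped.modify resource [] (fun x => x ++ [endpoint])
       else g
     else g)
    = if pvGetPath endpoint ≠ "" then g.modify (pvResource (pvGetPath endpoint)) [] (fun x => x ++ [endpoint]) else g := by
  show (if pvGetPath endpoint ≠ "" then _ else g) = _
  by_cases hp : pvGetPath endpoint ≠ ""
  · rw [if_pos hp, if_pos hp]
    show (if ((PySem.Str.split? (PySem.Str.stripChars (pvGetPath endpoint) "/") "/").getD []) ≠ [] then _ else g) = _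
    rw [if_pos (parts_ne_nil (PySem.Str.stripChars (pvGetPath endpoint) "/"))]
    exact setdefault_modify_collapse g (pvResource (pvGetPath endpoint)) (fun x => x ++ [endpoint])
  · rw [if_neg hp, if_neg hp]

-- A's fold over the endpoints is the modify-fold over B's keyed pairs
lemma foldA_eq (endpoints : List (List (String × String))) :
    ∀ (g : PySem.Dict String (List (List (String × String)))),
    endpoints.foldl
      (fun grouped endpoint =>
        let path := ((endpoint.find? (fun p => p.1 == "path")).map (·.2)).getD ""
        if path ≠ "" then
          let parts := (PySem.Str.split? (PySem.Str.stripChars path "/") "/").getD []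
          if parts ≠ [] then
            let resource := parts.headI
            let resource := if PySem.Str.startswith resource "v" && PySem.Str.strIsdigit (PySem.Str.slice resource (some 1) none)
              then (if parts.length > 1 then (PySem.List.pyGet? parts 1).getD "" else "root")
              else resource
            let grouped := if grouped.contains resource then grouped else grouped.insert resource []
            grouped.modify resource [] (fun x => x ++ [endpoint])
          else grouped
        else grouped) g
    = ((endpoints.filter (fun e => pvGetPath e ≠ "")).map (fun e => (pvResource (pvGetPath e), e))).foldl
        (fun d p => d.modify p.1 [] (fun x => x ++ [p.2])) g := by
  induction endpoints with
  | nil => intro g; rfl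
  | cons e es ih =>
    intro g
    rw [List.foldl_cons]
    by_cases he : pvGetPath e ≠ ""
    · have hfe : (List.filter (fun e => decide (pvGetPath e ≠ "")) (e :: es)) = e :: List.filter (fun e => decide (pvGetPath e ≠ "")) es := by
        simp [he]
      rw [hfe, List.map_cons, List.foldl_cons, ← ih]
      congr 1
      rw [stepA_eq g e, if_pos he]
    · have hfe : (List.filter (fun e => decide (pvGetPath e ≠ "")) (e :: es)) = List.filter (fun e => decide (pvGetPath e ≠ "")) es := by
        simp [he]
      rw [hfe, ← ih]
      congr 1
      rw [stepA_eq g e, if_neg he]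

-- a dict with nodup keys is its key list paired with the looked-up values
lemma items_eq_keys_map {κ : Type} [BEq κ] [LawfulBEq κ] {ν : Type} (d : PySem.Dict κ ν) (d0 : ν) (h : d.keys.Nodup) :
    d.items = d.keys.map (fun k => (k, d.getD k d0)) := by
  obtain ⟨items⟩ := d
  induction items with
  | nil => rfl
  | cons p rest ih =>
    obtain ⟨k, v⟩ := p
    simp only [PySem.Dict.keys, List.map_cons, List.nodup_cons] at h ⊢
    obtain ⟨hk, hrest⟩ := h
    simp only [List.cons.injEq]
    refine ⟨by simp [PySem.Dict.getD, PySem.Dict.get?], ?_⟩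
    have ihr := ih hrest
    simp only [PySem.Dict.keys] at ihr
    conv_lhs => rw [ihr]
    apply List.map_congr_left
    intro k' hk'
    have hne : (k == k') = false := by
      rw [Bool.eq_false_iff]
      intro hb
      exact hk (by simpa [eq_of_beq hb] using hk')
    simp [PySem.Dict.getD, PySem.Dict.get?, hne]

lemma update_nil_eq_dedup {α : Type} [BEq α] (l : List α) :
    PySem.Set.update ([] : PySem.Set α) l = PySem.List.dedup l := rfl

-- ===== VERDICT (by name: the statement is the Claim_ definition above) =====
theorem group_endpoints_spec : Claim_equal_group_endpoints := by
  intro endpoints _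
  unfold Spec_group_endpoints group_endpoints group_endpoints_alt
  rw [foldA_eq]
  set keyed := ((endpoints.filter (fun e => pvGetPath e ≠ "")).map (fun e => (pvResource (pvGetPath e), e))) with hkeyed
  set F := keyed.foldl (fun d p => d.modify p.1 [] (fun x => x ++ [p.2])) PySem.Dict.empty with hF
  have hkeys : F.keys = PySem.List.dedup (keyed.map (·.1)) := by
    rw [hF, PySem.Dict.keys_foldl_modify_key keyed (fun p => p.1) [] (fun _ p => (fun x => x ++ [p.2])) PySem.Dict.empty]
    exact update_nil_eq_dedup _
  have hnodup : F.keys.Nodup := by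
    rw [hF]
    exact PySem.Dict.nodup_keys_foldl_modify_key keyed (fun p => p.1) [] (fun _ p => (fun x => x ++ [p.2])) PySem.Dict.empty (by simp [PySem.Dict.empty, PySem.Dict.keys])
  rw [items_eq_keys_map F [] hnodup, hkeys]
  apply List.map_congr_left
  intro k _
  have hg := PySem.Dict.getD_foldl_modify_append keyed PySem.Dict.empty k
  rw [← hF] at hg
  rw [hg]
  simp [PySem.Dict.empty, PySem.Dict.getD, PySem.Dict.get?]
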